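-- pv_equiv track=rewrite | github.com/MrBrantCode/unitest_baseline | mut_generate/mist_train_cf/cf_88919/solution.py | sum_of_digit_cubes
-- ===== SOURCE A (Python) =====
-- def sum_of_digit_cubes(n):
--     if isinstance(n, list):
--         sum_of_cubes = 0
--         for element in n:
--             sum_of_cubes += sum_of_digit_cubes(element)
--         return sum_of_cubes
--     elif isinstance(n, int):
--         n = str(n)
--     elif not isinstance(n, str):
--         return "Error: Invalid parameter"
--
--     sum_of_cubes = 0
--
--     for digit in n:
--         if digit.isdigit():
--             sum_of_cubes += int(digit) ** 3
--
--     return sum_of_cubes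
-- ===== SOURCE B (Python) =====
-- def _scalar_cubes(item):
--     # digit-cube sum of one non-list item; invalid types yield the error string
--     if isinstance(item, int):
--         total = 0
--         m = abs(item)
--         while m:
--             m, d = divmod(m, 10)
--             total += d ** 3
--         return total
--     if isinstance(item, str):
--         return sum(int(c) ** 3 for c in item if c.isdigit())
--     return "Error: Invalid parameter"
--
--
-- def sum_of_digit_cubes(n):
--     if isinstance(n, list):
--         total = 0
--         stack = list(n)
--         while stack:
--             item = stack.pop()
--             if isinstance(item, list):
--                 stack.extend(item)
--             else:
--                 # an invalid nested item raises TypeError (int + str), as in the original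
--                 total += _scalar_cubes(item)
--         return total
--     return _scalar_cubes(n)
-- ===== Notes on version B (the rewrite author's own statement) =====
-- stated objective: alternative
-- what changed: B replaces A's recursion-plus-string-conversion (str(n), per-character isdigit/int) with an explicit worklist for nested lists and pure integer arithmetic (divmod by 10) for the digit-cube sum of ints, never converting to a string.
import Mathlib
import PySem

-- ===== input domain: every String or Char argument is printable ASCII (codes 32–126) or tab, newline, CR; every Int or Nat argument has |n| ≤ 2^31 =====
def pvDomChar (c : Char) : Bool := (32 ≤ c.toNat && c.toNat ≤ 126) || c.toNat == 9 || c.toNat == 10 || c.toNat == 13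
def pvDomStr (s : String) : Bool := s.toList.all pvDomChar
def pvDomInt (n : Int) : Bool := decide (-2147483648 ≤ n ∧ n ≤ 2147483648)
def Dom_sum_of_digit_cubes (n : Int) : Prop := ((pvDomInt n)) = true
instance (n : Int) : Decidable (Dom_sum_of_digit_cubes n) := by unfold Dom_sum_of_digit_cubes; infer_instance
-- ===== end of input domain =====

-- B replaces A's str(n)/per-character digit scan with pure integer arithmetic (divmod by 10);
-- equivalence is about the int argument (the Lean signature), where A takes its str(n) branch.

-- ===== PORT A =====
-- A (int branch): n = str(n); then for each char, if it is a digit add int(char)**3.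
-- PySem.Int.toChars n = (PySem.Int.toStr n).toList (str(n) as a char list);
-- int(digit) is ported as (PySem.Int.ofChars? [c]).getD 0 — exact here since the isdigit
-- guard guarantees ofChars? succeeds.
def sum_of_digit_cubes (n : Int) : Int :=
  (PySem.Int.toChars n).foldl
    (fun acc c =>
      if PySem.Chars.isdigit c then acc + ((PySem.Int.ofChars? [c]).getD 0) ^ 3 else acc) 0

-- ===== PORT B =====
-- B (int branch): m = abs(n); while m: m, d = divmod(m, 10); total += d ** 3.
def pvAltGo : Nat → Int → Int
  | m, total =>
    if m = 0 then total
    else pvAltGo (m / 10) (total + ((m % 10 : Nat) : Int) ^ 3)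
decreasing_by exact Nat.div_lt_self (Nat.pos_of_ne_zero (by assumption)) (by norm_num)

def sum_of_digit_cubes_alt (n : Int) : Int := pvAltGo n.natAbs 0

-- ===== PRECONDITION & SPEC =====
def Spec_sum_of_digit_cubes (n : Int) (out : Int) : Prop := out = sum_of_digit_cubes_alt n
instance (n : Int) (out : Int) : Decidable (Spec_sum_of_digit_cubes n out) := by unfold Spec_sum_of_digit_cubes; infer_instance

-- ===== CLAIM (what is proved, stated in full; the proofs are below) =====
def Claim_equal_sum_of_digit_cubes : Prop := ∀ (n : Int), Dom_sum_of_digit_cubes n → Spec_sum_of_digit_cubes n (sum_of_digit_cubes n)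

-- ===== LEMMAS AND PROOFS =====

-- digit-cube sum of a natural number, digit by digit
def pvS : Nat → Int
  | m => if m = 0 then 0 else ((m % 10 : Nat) : Int) ^ 3 + pvS (m / 10)
decreasing_by exact Nat.div_lt_self (Nat.pos_of_ne_zero (by assumption)) (by norm_num)

-- the characters Nat.toDigits 10 m produces, most significant first
def pvRevDigs : Nat → List Char
  | m =>
    if m < 10 then [(m % 10).digitChar]
    else pvRevDigs (m / 10) ++ [(m % 10).digitChar]
decreasing_by exact Nat.div_lt_self (by omega) (by norm_num)

-- the fold body of port A, named
def pvG (acc : Int) (c : Char) : Int :=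
  if PySem.Chars.isdigit c then acc + ((PySem.Int.ofChars? [c]).getD 0) ^ 3 else acc

lemma pvG_digitChar (acc : Int) (d : Nat) (hd : d < 10) :
    pvG acc d.digitChar = acc + (d : Int) ^ 3 := by
  have h1 : PySem.Chars.isdigit d.digitChar = true := by interval_cases d <;> decide
  have h2 : (PySem.Int.ofChars? [d.digitChar]).getD 0 = (d : Int) := by
    interval_cases d <;> decide
  simp [pvG, h1, h2]

lemma pvAltGo_eq (m : Nat) (acc : Int) : pvAltGo m acc = acc + pvS m := by
  induction m using Nat.strong_induction_on generalizing acc with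
  | _ m ih =>
    by_cases h : m = 0
    · rw [pvAltGo, pvS]; simp [h]
    · rw [pvAltGo, pvS, if_neg h, if_neg h,
        ih (m / 10) (Nat.div_lt_self (Nat.pos_of_ne_zero h) (by norm_num))]
      ring

lemma toDigitsCore_eq (fuel m : Nat) (ds : List Char) (h : m < fuel) :
    Nat.toDigitsCore 10 fuel m ds = pvRevDigs m ++ ds := by
  induction fuel generalizing m ds with
  | zero => omega
  | succ fuel ih =>
    rw [Nat.toDigitsCore, pvRevDigs]
    by_cases hlt : m < 10
    · have h0 : m / 10 = 0 := Nat.div_eq_of_lt hlt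
      simp [h0, hlt]
    · have h0 : m / 10 ≠ 0 := by
        intro hc
        exact hlt (Nat.lt_of_div_eq_zero (by norm_num) hc)
      simp only [hlt, if_false]
      rw [if_neg h0, ih (m / 10) _ (by
        have := Nat.div_lt_self (by omega : 0 < m) (by norm_num : 1 < 10)
        omega)]
      simp

lemma foldl_revDigs (m : Nat) (acc : Int) :
    (pvRevDigs m).foldl pvG acc = acc + pvS m := by
  induction m using Nat.strong_induction_on generalizing acc with
  | _ m ih =>
    rw [pvRevDigs]
    by_cases hlt : m < 10
    · simp only [hlt, if_pos, List.foldl]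
      rw [pvG_digitChar acc (m % 10) (Nat.mod_lt _ (by norm_num))]
      by_cases h0 : m = 0
      · rw [pvS]; simp [h0]
      · have hd : m / 10 = 0 := Nat.div_eq_of_lt hlt
        have hz : pvS 0 = 0 := by rw [pvS]; simp
        rw [pvS, if_neg h0, hd, hz]
        ring
    · simp only [hlt, if_false, List.foldl_append, List.foldl]
      rw [ih (m / 10) (Nat.div_lt_self (by omega) (by norm_num)) acc,
        pvG_digitChar _ (m % 10) (Nat.mod_lt _ (by norm_num))]
      conv_rhs => rw [pvS]
      rw [if_neg (by omega : ¬ m = 0)]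
      ring

lemma foldl_toDigits (m : Nat) :
    (Nat.toDigits 10 m).foldl pvG 0 = pvS m := by
  rw [Nat.toDigits, toDigitsCore_eq (m + 1) m [] (by omega)]
  simpa using foldl_revDigs m 0

-- ===== VERDICT (by name: the statement is the Claim_ definition above) =====
theorem sum_of_digit_cubes_spec : Claim_equal_sum_of_digit_cubes := by
  intro n _
  show sum_of_digit_cubes n = sum_of_digit_cubes_alt n
  unfold sum_of_digit_cubes sum_of_digit_cubes_alt PySem.Int.toChars
  rw [pvAltGo_eq]
  by_cases h : n < 0
  · rw [if_pos h]
    have : (fun acc c => if PySem.Chars.isdigit c then acc + ((PySem.Int.ofChars? [c]).getD 0) ^ 3 else acc) = pvG := by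
      funext acc c; rfl
    rw [this]
    show List.foldl pvG (pvG 0 '-') (Nat.toDigits 10 n.natAbs) = 0 + pvS n.natAbs
    have hminus : pvG 0 '-' = 0 := by decide
    rw [hminus, foldl_toDigits]
    ring
  · rw [if_neg h]
    have : (fun acc c => if PySem.Chars.isdigit c then acc + ((PySem.Int.ofChars? [c]).getD 0) ^ 3 else acc) = pvG := by
      funext acc c; rfl
    rw [this, foldl_toDigits]
    have : n.toNat = n.natAbs := by omega
    rw [this]
    ring
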